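-- pv_equiv track=rewrite | github.com/B202433-2021/BPSM_Python_Exam_Practice | kmers.py | kmer_counter
-- ===== SOURCE A (Python) =====
-- def kmer_counter(dna, k_length, min):
--
-- 	kmers = []
-- 	for i in range(len(dna) - k_length):
-- 		start = i
-- 		end = i + k_length
-- 		kmer = dna[start:end]
-- 		kmers.append(kmer)
--
-- 	kmers_above_threshold = []
-- 	for k in kmers:
-- 		if kmers.count(k) > min:
-- 			kmers_above_threshold.append(k)
-- 	kmers_above_threshold_set = set(kmers_above_threshold)
--
-- 	return kmers_above_threshold_set
-- ===== SOURCE B (Python) =====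
-- def kmer_counter(dna, k_length, min):
-- 	kmers = [dna[i:i + k_length] for i in range(len(dna) - k_length)]
-- 	srt = sorted(kmers)
-- 	frequent = set()
-- 	rest = srt
-- 	while rest:
-- 		head = rest[0]
-- 		run = 1
-- 		while run < len(rest) and rest[run] == head:
-- 			run += 1
-- 		if run > min:
-- 			frequent.add(head)
-- 		rest = rest[run:]
-- 	return {k for k in kmers if k in frequent}
-- ===== Notes on version B (the rewrite author's own statement) =====
-- stated objective: faster
-- what changed: Replaced A's per-element kmers.count scan with a sort-then-run-scan: sort the k-mer list once, walk it once measuring consecutive runs to collect the frequent k-mers, then build the result set by membership in that collection.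
import Mathlib
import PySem

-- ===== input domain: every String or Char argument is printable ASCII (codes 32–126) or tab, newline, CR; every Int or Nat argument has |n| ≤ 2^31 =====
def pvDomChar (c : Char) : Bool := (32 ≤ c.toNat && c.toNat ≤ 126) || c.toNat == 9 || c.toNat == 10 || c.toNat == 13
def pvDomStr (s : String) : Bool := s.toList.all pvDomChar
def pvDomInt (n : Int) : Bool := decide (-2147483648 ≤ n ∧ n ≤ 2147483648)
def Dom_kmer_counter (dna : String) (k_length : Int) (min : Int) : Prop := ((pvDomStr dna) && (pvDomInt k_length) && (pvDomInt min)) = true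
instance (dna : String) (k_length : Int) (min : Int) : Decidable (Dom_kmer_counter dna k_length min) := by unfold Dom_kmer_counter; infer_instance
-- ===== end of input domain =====

-- B sorts the k-mer list and scans consecutive runs once instead of A's per-element count scan (faster).

-- ===== PORT A =====
def kmer_counter (dna : String) (k_length : Int) (min : Int) : List String :=
  let kmers : List String :=
    (PySem.List.pyRange 0 (PySem.Str.len dna - k_length) 1).foldl
      (fun acc i => acc ++ [PySem.Str.slice dna (some i) (some (i + k_length))]) []
  let kmers_above_threshold : List String :=
    kmers.foldl (fun acc k => if (PySem.List.count kmers k : Int) > min then acc ++ [k] else acc) []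
  PySem.Set.ofList kmers_above_threshold

-- ===== PORT B =====
-- outer 'while rest:' loop; the inner 'while run < len(rest) and rest[run] == head' scan of the
-- current run is the takeWhile length over the tail (same left-to-right comparison of rest[run] with head)
def pvRunScan (rest : List String) (minv : Int) (frequent : PySem.Set String) : PySem.Set String :=
  match rest with
  | [] => frequent
  | head :: tl =>
    let run : Nat := 1 + (tl.takeWhile (fun x => x == head)).length
    let frequent' := if minv < (run : Int) then PySem.Set.add frequent head else frequent
    pvRunScan ((head :: tl).drop run) minv frequent'
termination_by rest.length
decreasing_by simp

def kmer_counter_alt (dna : String) (k_length : Int) (min : Int) : List String :=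
  let kmers : List String :=
    (PySem.List.pyRange 0 (PySem.Str.len dna - k_length) 1).foldl
      (fun acc i => acc ++ [PySem.Str.slice dna (some i) (some (i + k_length))]) []
  let srt := PySem.List.sorted kmers (fun x => x) false
  let frequent := pvRunScan srt min PySem.Set.empty
  PySem.Set.ofList (kmers.filter (fun k => PySem.Set.contains frequent k))

-- ===== PRECONDITION & SPEC =====
def Spec_kmer_counter (dna : String) (k_length : Int) (min : Int) (out : List String) : Prop := out = kmer_counter_alt dna k_length min
instance (dna : String) (k_length : Int) (min : Int) (out : List String) : Decidable (Spec_kmer_counter dna k_length min out) := by unfold Spec_kmer_counter; infer_instance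

-- ===== CLAIM (what is proved, stated in full; the proofs are below) =====
def Claim_equal_kmer_counter : Prop := ∀ (dna : String) (k_length : Int) (min : Int), Dom_kmer_counter dna k_length min → Spec_kmer_counter dna k_length min (kmer_counter dna k_length min)

-- ===== LEMMAS AND PROOFS =====

-- run-scan over a sorted list collects exactly the elements whose count exceeds the threshold
theorem mem_pvRunScan (l : List String) (minv : Int) (acc : PySem.Set String)
    (hs : l.Pairwise (· ≤ ·)) (x : String) :
    x ∈ pvRunScan l minv acc ↔ x ∈ acc ∨ (x ∈ l ∧ minv < (l.count x : Int)) := by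
  revert hs
  fun_induction pvRunScan l minv acc
  case case1 => intro _; simp
  case case2 acc hd tl run freq ih =>
    intro hs
    have hfreqdef : freq = if h : minv < ((1 + (tl.takeWhile (fun x => x == hd)).length : Nat) : Int) then PySem.Set.add acc hd else acc := rfl
    have hrundef : run = 1 + (tl.takeWhile (fun x => x == hd)).length := rfl
    clear_value freq run
    subst hrundef
    subst hfreqdef
    obtain ⟨hle, hpair_tl⟩ := List.pairwise_cons.mp hs
    set t1 := tl.takeWhile (fun x => x == hd) with ht1def
    set t2 := tl.dropWhile (fun x => x == hd) with ht2def
    have hdrop : (hd :: tl).drop (1 + t1.length) = t2 := by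
      rw [Nat.add_comm, List.drop_succ_cons]
      conv_lhs => rw [← List.takeWhile_append_dropWhile (p := fun x => x == hd) (l := tl)]
      rw [List.drop_left]
    have ht1 : ∀ y ∈ t1, y = hd := by
      intro y hy
      have h := List.mem_takeWhile_imp hy
      simpa using h
    have hpair_t2 : t2.Pairwise (· ≤ ·) := hpair_tl.sublist (List.dropWhile_sublist _)
    have hsub_t2 : ∀ y ∈ t2, y ∈ tl := fun y hy => (List.dropWhile_sublist _).mem hy
    have hhd_t2 : hd ∉ t2 := by
      intro hmem
      cases ht2 : t2 with
      | nil => rw [ht2] at hmem; exact absurd hmem (List.not_mem_nil)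
      | cons d t2' =>
        have hpd := List.head?_dropWhile_not (fun x => x == hd) tl
        rw [← ht2def, ht2] at hpd
        simp at hpd
        have hdle : hd ≤ d := hle d (hsub_t2 d (by simp [ht2]))
        rw [ht2] at hmem
        rcases List.mem_cons.mp hmem with h | h
        · exact hpd h.symm
        · have : d ≤ hd := by
            rw [ht2] at hpair_t2
            exact (List.pairwise_cons.mp hpair_t2).1 hd h
          exact hpd (le_antisymm this hdle)
    have hcount_hd : (hd :: tl).count hd = 1 + t1.length := by
      rw [List.count_cons_self]
      conv_lhs => rw [← List.takeWhile_append_dropWhile (p := fun x => x == hd) (l := tl)]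
      rw [List.count_append, ← ht1def, ← ht2def]
      rw [List.count_eq_length.mpr (fun b hb => (ht1 b hb).symm), List.count_eq_zero.mpr hhd_t2]
      omega
    have hcount_ne : ∀ y, y ≠ hd → (hd :: tl).count y = t2.count y := by
      intro y hy
      rw [List.count_cons_of_ne (Ne.symm hy)]
      conv_lhs => rw [← List.takeWhile_append_dropWhile (p := fun x => x == hd) (l := tl)]
      rw [List.count_append, ← ht1def, ← ht2def]
      rw [List.count_eq_zero.mpr (fun hmem => hy (ht1 y hmem))]
      omega
    have hmem_ne : ∀ y, y ≠ hd → (y ∈ hd :: tl ↔ y ∈ t2) := by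
      intro y hy
      rw [List.mem_cons]
      constructor
      · rintro (h | h)
        · exact absurd h hy
        · conv at h => rw [← List.takeWhile_append_dropWhile (p := fun x => x == hd) (l := tl)]
          rcases List.mem_append.mp h with h | h
          · exact absurd (ht1 y h) hy
          · exact h
      · intro h; exact Or.inr (hsub_t2 y h)
    rw [hdrop] at ih ⊢
    rw [ih hpair_t2]
    by_cases hx : x = hd
    · subst hx
      simp only [hhd_t2, false_and, or_false]
      rw [hcount_hd]
      by_cases hrun : minv < ((1 + t1.length : Nat) : Int)
      · rw [dif_pos hrun]
        simp [PySem.Set.mem_add]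
        exact Or.inr (by exact_mod_cast hrun)
      · rw [dif_neg hrun]
        simp
        intro h
        exact absurd (by exact_mod_cast h) hrun
    · rw [hcount_ne x hx, hmem_ne x hx]
      by_cases hrun : minv < ((1 + t1.length : Nat) : Int)
      · rw [dif_pos hrun]
        simp [PySem.Set.mem_add, hx]
      · rw [dif_neg hrun]

-- ===== VERDICT (by name: the statement is the Claim_ definition above) =====
theorem kmer_counter_spec : Claim_equal_kmer_counter := by
  intro dna k_length min _
  unfold Spec_kmer_counter kmer_counter kmer_counter_alt
  dsimp only
  set kmers : List String :=
    (PySem.List.pyRange 0 (PySem.Str.len dna - k_length) 1).foldl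
      (fun acc i => acc ++ [PySem.Str.slice dna (some i) (some (i + k_length))]) [] with hk
  have h1 : kmers.foldl (fun acc k => if (PySem.List.count kmers k : Int) > min then acc ++ [k] else acc) []
      = kmers.filter (fun k => decide ((PySem.List.count kmers k : Int) > min)) := by
    have := PySem.List.foldl_append_if (fun k => decide ((PySem.List.count kmers k : Int) > min)) (id : String → String) kmers []
    simpa using this
  rw [h1]
  congr 1
  apply List.filter_congr
  intro k hk2
  have hsorted : (PySem.List.sorted kmers (fun x => x) false).Pairwise (· ≤ ·) :=
    PySem.List.sorted_pairwise kmers (fun x => x)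
  have hmem := mem_pvRunScan (PySem.List.sorted kmers (fun x => x) false) min PySem.Set.empty hsorted k
  have hcnt : (PySem.List.sorted kmers (fun x => x) false).count k = kmers.count k :=
    (PySem.List.sorted_perm kmers (fun x => x) false).count_eq k
  have hmem2 : k ∈ PySem.List.sorted kmers (fun x => x) false :=
    (PySem.List.mem_sorted kmers (fun x => x) false k).mpr hk2
  rw [Bool.eq_iff_iff]
  rw [PySem.Set.contains_iff, hmem, decide_eq_true_eq]
  simp [PySem.Set.empty, hmem2, hcnt, PySem.List.count_eq, gt_iff_lt]
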